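-- pv_equiv track=rewrite | github.com/anuj527/ANUJ-KUMAR | PPT ASSIGNMENT 17.py | reveal_cards_increasing_order
-- ===== SOURCE A (Python) =====
-- from collections import deque
-- from collections import deque
--
-- def reveal_cards_increasing_order(deck):
--     deck.sort()  # Sort the deck in ascending order
--     revealed = deque()
--
--     for card in reversed(deck):
--         if revealed:
--             revealed.appendleft(revealed.pop())  # Move the last card to the front
--         revealed.appendleft(card)  # Add the current card to the front
--
--     return list(revealed)
-- ===== SOURCE B (Python) =====
-- from collections import deque
--
-- def reveal_cards_increasing_order(deck):
--     deck.sort()  # same in-place sort as A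
--     n = len(deck)
--     result = [0] * n
--     q = deque(range(n))
--     for card in deck:
--         i = q.popleft()
--         result[i] = card
--         if q:
--             q.append(q.popleft())
--     return result
-- ===== Notes on version B (the rewrite author's own statement) =====
-- stated objective: idiomatic
-- what changed: B runs the standard forward simulation with an index queue (assign each sorted card to the index popped from a rotating deque), instead of A's reverse reconstruction that rotates the partial answer backwards.
import Mathlib
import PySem

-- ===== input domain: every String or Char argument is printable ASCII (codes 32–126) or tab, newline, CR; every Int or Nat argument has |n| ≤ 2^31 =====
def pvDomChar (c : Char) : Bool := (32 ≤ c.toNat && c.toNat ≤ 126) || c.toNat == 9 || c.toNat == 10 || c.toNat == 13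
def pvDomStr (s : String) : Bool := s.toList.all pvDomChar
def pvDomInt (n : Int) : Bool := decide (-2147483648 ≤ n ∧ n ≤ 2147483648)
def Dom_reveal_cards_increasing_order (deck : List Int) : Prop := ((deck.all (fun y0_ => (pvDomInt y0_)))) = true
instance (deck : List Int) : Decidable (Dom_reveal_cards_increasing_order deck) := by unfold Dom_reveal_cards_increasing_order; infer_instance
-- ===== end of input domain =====

-- B replaces A's reverse reconstruction (rotating the partial answer backwards) by the
-- standard forward simulation with an index queue; both sort the argument in place, and the
-- equivalence proved here is about the return value (both perform the same in-place sort).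

-- ===== PORT A =====
-- deque step: if revealed: revealed.appendleft(revealed.pop()); revealed.appendleft(card)
def pvStepA (revealed : List Int) (card : Int) : List Int :=
  let revealed := if revealed ≠ [] then (revealed.getLast?.getD 0) :: revealed.dropLast else revealed
  card :: revealed

def reveal_cards_increasing_order (deck : List Int) : List Int :=
  let d := PySem.List.sorted deck (fun x => x) false   -- deck.sort()
  (d.reverse).foldl pvStepA []                          -- for card in reversed(deck): …

-- ===== PORT B =====
-- one iteration of B's loop: i = q.popleft(); result[i] = card; if q: q.append(q.popleft())
def pvStepB (st : List Int × List Nat) (card : Int) : List Int × List Nat :=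
  match st with
  | (result, []) => (result, [])   -- unreachable: the queue holds exactly one index per remaining card
  | (result, i :: q) =>
      let result := result.set i card
      let q := match q with
               | [] => q
               | j :: rest => rest ++ [j]
      (result, q)

def reveal_cards_increasing_order_alt (deck : List Int) : List Int :=
  let d := PySem.List.sorted deck (fun x => x) false   -- deck.sort()
  let n := d.length
  (d.foldl pvStepB (List.replicate n 0, List.range n)).1

-- ===== PRECONDITION & SPEC =====
def Spec_reveal_cards_increasing_order (deck : List Int) (out : List Int) : Prop := out = reveal_cards_increasing_order_alt deck
instance (deck : List Int) (out : List Int) : Decidable (Spec_reveal_cards_increasing_order deck out) := by unfold Spec_reveal_cards_increasing_order; infer_instance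

-- ===== CLAIM (what is proved, stated in full; the proofs are below) =====
def Claim_equal_reveal_cards_increasing_order : Prop := ∀ (deck : List Int), Dom_reveal_cards_increasing_order deck → Spec_reveal_cards_increasing_order deck (reveal_cards_increasing_order deck)

-- ===== LEMMAS AND PROOFS =====

-- the "reveal" game: pop the front card, move the next one to the bottom
def pvMove {α : Type} : List α → List α
  | [] => []
  | x :: xs => xs ++ [x]

lemma length_pvMove {α : Type} (l : List α) : (pvMove l).length = l.length := by
  cases l <;> simp [pvMove]

def pvReveal {α : Type} : List α → List α
  | [] => []
  | x :: xs => x :: pvReveal (pvMove xs)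
termination_by l => l.length
decreasing_by simp [length_pvMove]

lemma length_pvReveal {α : Type} (l : List α) : (pvReveal l).length = l.length := by
  induction l using pvReveal.induct with
  | case1 => simp [pvReveal]
  | case2 x xs ih => simp [pvReveal, ih, length_pvMove]

lemma pvMove_perm {α : Type} (l : List α) : (pvMove l).Perm l := by
  cases l with
  | nil => simp [pvMove]
  | cons x xs => simp [pvMove]

lemma pvReveal_map {α β : Type} (f : α → β) (l : List α) :
    pvReveal (l.map f) = (pvReveal l).map f := by
  induction l using pvReveal.induct with
  | case1 => simp [pvReveal]
  | case2 x xs ih =>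
      have hm : pvMove (xs.map f) = (pvMove xs).map f := by cases xs <;> simp [pvMove]
      simp [pvReveal, hm, ih]

lemma pvMove_inj {α : Type} {a b : List α} (h : pvMove a = pvMove b) : a = b := by
  cases a with
  | nil => cases b with
    | nil => rfl
    | cons y ys =>
        simp only [pvMove, ← List.concat_eq_append] at h
        exact absurd (congrArg List.length h) (by simp)
  | cons x xs => cases b with
    | nil =>
        simp only [pvMove, ← List.concat_eq_append] at h
        exact absurd (congrArg List.length h) (by simp)
    | cons y ys =>
        simp only [pvMove, ← List.concat_eq_append, List.concat_inj] at h
        simp [h.1, h.2]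

lemma pvReveal_inj {α : Type} : ∀ {a b : List α}, pvReveal a = pvReveal b → a = b := by
  intro a
  induction a using pvReveal.induct with
  | case1 =>
      intro b h
      have : b.length = 0 := by
        have := congrArg List.length h
        simp [length_pvReveal, pvReveal] at this; omega
      simpa using (List.length_eq_zero_iff.mp this).symm
  | case2 x xs ih =>
      intro b h
      cases b with
      | nil =>
          exfalso
          have := congrArg List.length h
          simp [length_pvReveal, pvReveal] at this
      | cons y ys =>
          simp only [pvReveal, List.cons.injEq] at h
          obtain ⟨hx, ht⟩ := h
          have := pvMove_inj (ih ht)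
          simp [hx, this]

-- A side: the rotation undone by one move
lemma pvMove_rot (L : List Int) :
    pvMove (if L ≠ [] then (L.getLast?.getD 0) :: L.dropLast else L) = L := by
  by_cases h : L = []
  · simp [h, pvMove]
  · simp only [h, ne_eq, not_false_iff, if_pos]
    rw [List.getLast?_eq_some_getLast h]
    simp [pvMove, List.dropLast_concat_getLast h]

lemma revealA (l : List Int) : pvReveal (l.foldl pvStepA []) = l.reverse := by
  induction l using List.reverseRecOn with
  | nil => simp [pvReveal]
  | append_singleton l c ih =>
      rw [List.foldl_append]
      simp only [List.foldl_cons, List.foldl_nil]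
      show pvReveal (pvStepA (l.foldl pvStepA []) c) = _
      rw [pvStepA]
      simp only [pvReveal]
      rw [pvMove_rot, ih]
      simp

-- B side: queue-loop invariant.  Popped indices come in the order pvReveal q and receive
-- the cards in order; indices outside q keep their old values.
lemma stepB_eq (r : List Int) (i : ℕ) (q : List ℕ) (c : Int) :
    pvStepB (r, i :: q) c = (r.set i c, pvMove q) := by
  cases q <;> rfl

lemma loopB_spec : ∀ (l : List Int) (q : List ℕ) (r : List Int),
    q.length = l.length → q.Nodup → (∀ i ∈ q, i < r.length) →
    ((pvReveal q).map (fun i => (l.foldl pvStepB (r, q)).1.getD i 0) = l)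
    ∧ (l.foldl pvStepB (r, q)).1.length = r.length
    ∧ (∀ j, j ∉ q → (l.foldl pvStepB (r, q)).1.getD j 0 = r.getD j 0) := by
  intro l
  induction l with
  | nil =>
      intro q r hlen _ _
      have : q = [] := List.length_eq_zero_iff.mp (by simpa using hlen)
      subst this
      simp [pvReveal]
  | cons c cs ih =>
      intro q r hlen hnd hbd
      cases q with
      | nil => simp at hlen
      | cons i q' =>
          have hiq' : i ∉ q' := (List.nodup_cons.mp hnd).1
          have hnd' : q'.Nodup := (List.nodup_cons.mp hnd).2
          have hperm := pvMove_perm q'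
          have hi : i < r.length := hbd i (by simp)
          have hlen' : (pvMove q').length = cs.length := by
            rw [length_pvMove]; simpa using hlen
          have hnd'' : (pvMove q').Nodup := hperm.nodup_iff.mpr hnd'
          have hbd' : ∀ j ∈ pvMove q', j < (r.set i c).length := by
            intro j hj
            have : j ∈ q' := hperm.mem_iff.mp hj
            simpa using hbd j (by simp [this])
          have IH := ih (pvMove q') (r.set i c) hlen' hnd'' hbd'
          have hfold : (c :: cs).foldl pvStepB (r, i :: q') = cs.foldl pvStepB (r.set i c, pvMove q') := by
            simp [stepB_eq]
          rw [hfold]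
          obtain ⟨IH1, IH2, IH3⟩ := IH
          have hi_not : i ∉ pvMove q' := fun h => hiq' (hperm.mem_iff.mp h)
          refine ⟨?_, by simpa using IH2, ?_⟩
          · simp only [pvReveal, List.map_cons]
            rw [IH3 i hi_not]
            have : (r.set i c).getD i 0 = c := by
              rw [List.getD_eq_getElem?_getD, List.getElem?_set_self (by simpa using hi)]
              rfl
            rw [this, IH1]
          · intro j hj
            have hj1 : j ≠ i := by simp at hj; exact hj.1
            have hj2 : j ∉ q' := by simp at hj; exact hj.2
            have hj3 : j ∉ pvMove q' := fun h => hj2 (hperm.mem_iff.mp h)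
            rw [IH3 j hj3]
            rw [List.getD_eq_getElem?_getD, List.getD_eq_getElem?_getD,
                List.getElem?_set_ne (by omega)]

lemma revealB (d : List Int) :
    pvReveal ((d.foldl pvStepB (List.replicate d.length 0, List.range d.length)).1) = d := by
  set n := d.length with hn
  obtain ⟨H1, H2, _⟩ := loopB_spec d (List.range n) (List.replicate n 0)
    (by simp [hn]) (List.nodup_range) (by intro i hi; simpa using List.mem_range.mp hi)
  set fin := (d.foldl pvStepB (List.replicate n 0, List.range n)).1 with hfin
  have hlenfin : fin.length = n := by simpa using H2
  have hfin_eq : fin = (List.range n).map (fun i => fin.getD i 0) := by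
    apply List.ext_getElem
    · simp [hlenfin]
    · intro j h1 h2
      simp only [List.getElem_map, List.getElem_range]
      rw [List.getD_eq_getElem?_getD, List.getElem?_eq_getElem h1]
      rfl
  calc pvReveal fin = pvReveal ((List.range n).map (fun i => fin.getD i 0)) := by rw [← hfin_eq]
    _ = (pvReveal (List.range n)).map (fun i => fin.getD i 0) := pvReveal_map _ _
    _ = d := H1

-- ===== VERDICT (by name: the statement is the Claim_ definition above) =====
theorem reveal_cards_increasing_order_spec : Claim_equal_reveal_cards_increasing_order := by
  intro deck _
  unfold Spec_reveal_cards_increasing_order reveal_cards_increasing_order reveal_cards_increasing_order_alt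
  apply pvReveal_inj
  rw [revealB]
  rw [revealA]
  simp
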